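-- pv_equiv track=rewrite | github.com/caseSHY/AI-CLI | src/agentutils/protocol.py | selected_indexes
-- ===== SOURCE A (Python) =====
-- def selected_indexes(length: int, ranges: list[tuple[int | None, int | None]]) -> list[int]:
--     indexes: list[int] = []
--     seen: set[int] = set()
--     for start, end in ranges:
--         first = 1 if start is None else start
--         last = length if end is None else end
--         for one_based in range(first, min(last, length) + 1):
--             zero_based = one_based - 1
--             if zero_based not in seen:
--                 seen.add(zero_based)
--                 indexes.append(zero_based)
--     return indexes
-- ===== SOURCE B (Python) =====
-- def selected_indexes(length: int, ranges: list[tuple[int | None, int | None]]) -> list[int]: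
--     out: list[int] = []
--     covered: list[tuple[int, int]] = []  # sorted, disjoint, non-adjacent, inclusive 1-based intervals
--     for start, end in ranges:
--         lo = 1 if start is None else start
--         hi = min(length if end is None else end, length)
--         if lo > hi:
--             continue
--         out.extend(_gaps(lo, hi, covered))
--         covered = _merge(lo, hi, covered)
--     return out
--
--
-- def _gaps(cur: int, hi: int, covered: list[tuple[int, int]]) -> list[int]:
--     # zero-based indexes of one-based positions in [cur, hi] not covered, increasing
--     res: list[int] = []
--     for a, b in covered:
--         if b < cur:
--             continue
--         if a > hi:
--             break
--         res.extend(range(cur - 1, min(a - 1, hi)))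
--         cur = b + 1
--         if cur > hi:
--             return res
--     res.extend(range(cur - 1, hi))
--     return res
--
--
-- def _merge(lo: int, hi: int, covered: list[tuple[int, int]]) -> list[tuple[int, int]]:
--     # insert [lo, hi], coalescing overlapping or adjacent intervals, in one pass
--     pre: list[tuple[int, int]] = []
--     post: list[tuple[int, int]] = []
--     for a, b in covered:
--         if b < lo - 1:
--             pre.append((a, b))
--         elif a > hi + 1:
--             post.append((a, b))
--         else:
--             lo = min(lo, a)
--             hi = max(hi, b)
--     return pre + [(lo, hi)] + post
-- ===== Notes on version B (the rewrite author's own statement) =====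
-- stated objective: faster
-- what changed: B replaces A's per-index seen-set scan (which re-walks every already-seen index of every range) by a sorted list of disjoint covered intervals, emitting only the uncovered gap positions of each range and coalescing the range into the interval list.
import Mathlib
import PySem

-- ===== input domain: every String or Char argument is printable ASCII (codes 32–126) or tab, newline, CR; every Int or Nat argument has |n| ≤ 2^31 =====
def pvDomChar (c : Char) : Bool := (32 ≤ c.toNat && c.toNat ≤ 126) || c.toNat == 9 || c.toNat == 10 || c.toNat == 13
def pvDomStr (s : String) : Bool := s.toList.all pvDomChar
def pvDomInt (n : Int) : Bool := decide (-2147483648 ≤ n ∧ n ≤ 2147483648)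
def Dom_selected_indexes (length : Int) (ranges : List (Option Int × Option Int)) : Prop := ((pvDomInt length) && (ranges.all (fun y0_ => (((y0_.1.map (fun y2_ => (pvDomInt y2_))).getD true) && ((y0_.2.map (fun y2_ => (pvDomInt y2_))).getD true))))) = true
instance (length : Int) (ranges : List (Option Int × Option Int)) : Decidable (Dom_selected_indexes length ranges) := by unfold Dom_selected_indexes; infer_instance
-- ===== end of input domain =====

-- ===== PORT A =====
-- B replaces A's per-index seen-set scan by a sorted list of covered intervals,
-- emitting only the uncovered gaps of each range (objective: faster on overlapping ranges).
def selected_indexes (length : Int) (ranges : List (Option Int × Option Int)) : List Int :=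
  (ranges.foldl
    (fun (st : List Int × PySem.Set Int) r =>
      let first : Int := match r.1 with | none => 1 | some s => s
      let last : Int := match r.2 with | none => length | some e => e
      (PySem.List.pyRange first (min last length + 1)).foldl
        (fun st one_based =>
          let zero_based := one_based - 1
          if st.2.contains zero_based then st
          else (st.1 ++ [zero_based], st.2.add zero_based))
        st)
    ([], PySem.Set.empty)).1

-- ===== PORT B =====
-- _gaps: zero-based indexes of one-based positions in [cur, hi] not covered, increasing
def pvGapsGo (hi : Int) : Int → List Int → List (Int × Int) → List Int
  | cur, res, [] => res ++ PySem.List.pyRange (cur - 1) hi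
  | cur, res, (a, b) :: rest =>
      if b < cur then pvGapsGo hi cur res rest
      else if a > hi then res ++ PySem.List.pyRange (cur - 1) hi
      else
        let res' := res ++ PySem.List.pyRange (cur - 1) (min (a - 1) hi)
        if b + 1 > hi then res' else pvGapsGo hi (b + 1) res' rest

-- _merge: insert [lo, hi], coalescing overlapping or adjacent intervals, in one pass
def pvMergeGo : Int → Int → List (Int × Int) → List (Int × Int) → List (Int × Int) → List (Int × Int)
  | lo, hi, pre, post, [] => pre ++ [(lo, hi)] ++ post
  | lo, hi, pre, post, (a, b) :: rest =>
      if b < lo - 1 then pvMergeGo lo hi (pre ++ [(a, b)]) post rest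
      else if a > hi + 1 then pvMergeGo lo hi pre (post ++ [(a, b)]) rest
      else pvMergeGo (min lo a) (max hi b) pre post rest

def selected_indexes_alt (length : Int) (ranges : List (Option Int × Option Int)) : List Int :=
  (ranges.foldl
    (fun (st : List Int × List (Int × Int)) r =>
      let lo : Int := match r.1 with | none => 1 | some s => s
      let hi : Int := min (match r.2 with | none => length | some e => e) length
      if lo > hi then st
      else (st.1 ++ pvGapsGo hi lo [] st.2, pvMergeGo lo hi [] [] st.2))
    ([], [])).1

-- ===== PRECONDITION & SPEC =====
def Spec_selected_indexes (length : Int) (ranges : List (Option Int × Option Int)) (out : List Int) : Prop := out = selected_indexes_alt length ranges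
instance (length : Int) (ranges : List (Option Int × Option Int)) (out : List Int) : Decidable (Spec_selected_indexes length ranges out) := by unfold Spec_selected_indexes; infer_instance

-- ===== CLAIM (what is proved, stated in full; the proofs are below) =====
def Claim_equal_selected_indexes : Prop := ∀ (length : Int) (ranges : List (Option Int × Option Int)), Dom_selected_indexes length ranges → Spec_selected_indexes length ranges (selected_indexes length ranges)

-- ===== LEMMAS AND PROOFS =====

-- x lies in some covered interval
def covMem (x : Int) (c : List (Int × Int)) : Bool :=
  c.any (fun p => decide (p.1 ≤ x) && decide (x ≤ p.2))

-- covered intervals are nonempty, sorted, pairwise disjoint and non-adjacent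
def covInv (c : List (Int × Int)) : Prop :=
  c.Pairwise (fun p q => p.2 + 1 < q.1) ∧ ∀ p ∈ c, p.1 ≤ p.2

lemma pyRange_nil {u v : Int} (h : v ≤ u) : PySem.List.pyRange u v = [] := by
  rw [PySem.List.pyRange_one]
  have : (v - u).toNat = 0 := by omega
  simp [this]

lemma pyRange_shift (u v : Int) :
    PySem.List.pyRange (u - 1) v = (PySem.List.pyRange u (v + 1)).map (fun x => x - 1) := by
  rw [PySem.List.pyRange_one, PySem.List.pyRange_one, List.map_map]
  have h : v - (u - 1) = v + 1 - u := by ring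
  rw [h]
  exact List.map_congr_left (fun k _ => by simp [Function.comp]; ring)

lemma contains_add (s : PySem.Set Int) (y x : Int) :
    (s.add y).contains x = (s.contains x || x == y) := by
  simp only [PySem.Set.add, PySem.Set.contains]
  split_ifs with h
  · cases hxy : (x == y) with
    | true => simp_all [beq_iff_eq]
    | false => simp
  · cases hxy : (x == y) <;> simp_all [beq_iff_eq]

-- A's inner loop: output side
lemma innerA_fst (l : List Int) (hnd : l.Nodup) :
    ∀ (out : List Int) (seen : PySem.Set Int),
    (l.foldl (fun st one_based =>
        let zero_based := one_based - 1
        if PySem.Set.contains st.2 zero_based then st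
        else (st.1 ++ [zero_based], PySem.Set.add st.2 zero_based)) (out, seen)).1
      = out ++ (l.filter (fun ob => !seen.contains (ob - 1))).map (fun ob => ob - 1) := by
  induction l with
  | nil => simp
  | cons h t ih =>
    intro out seen
    obtain ⟨hh, hnd'⟩ := List.nodup_cons.mp hnd
    simp only [List.foldl_cons, List.filter_cons]
    by_cases hc : PySem.Set.contains seen (h - 1)
    · simp only [hc, if_pos, Bool.not_true]
      rw [ih hnd' out seen]
      simp
    · simp only [hc, Bool.not_false]
      rw [if_neg (by simpa [PySem.Set.contains] using hc), ih hnd' (out ++ [h - 1]) (seen.add (h - 1))]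
      have hf : t.filter (fun ob => !(seen.add (h-1)).contains (ob - 1))
          = t.filter (fun ob => !seen.contains (ob - 1)) := by
        apply List.filter_congr
        intro x hx
        rw [contains_add]
        have : ¬ (x - 1 == h - 1) = true := by
          simp [beq_iff_eq]
          intro he; exact hh (by omega ▸ hx)  -- x = h
        simp only [Bool.not_or]
        cases hxy : ((x-1) == (h-1)) with
        | true => exact absurd hxy this
        | false => simp
      rw [hf]
      simp

-- A's inner loop: seen side
lemma innerA_snd (l : List Int) :
    ∀ (out : List Int) (seen : PySem.Set Int) (x : Int),
    ((l.foldl (fun st one_based =>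
        let zero_based := one_based - 1
        if PySem.Set.contains st.2 zero_based then st
        else (st.1 ++ [zero_based], PySem.Set.add st.2 zero_based)) (out, seen)).2).contains x
      = (seen.contains x || l.any (fun ob => ob - 1 == x)) := by
  induction l with
  | nil => simp
  | cons h t ih =>
    intro out seen x
    simp only [List.foldl_cons, List.any_cons]
    by_cases hc : PySem.Set.contains seen (h - 1)
    · simp only [hc, if_pos]
      rw [ih out seen x]
      cases hhx : ((h - 1) == x) with
      | true =>
        have hx : x = h - 1 := (beq_iff_eq.mp hhx).symm
        subst hx
        simp only [hc]
        simp
      | false => simp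
    · rw [if_neg (by simpa [PySem.Set.contains] using hc)]
      rw [ih (out ++ [h-1]) (seen.add (h-1)) x, contains_add]
      cases hhx : ((h - 1) == x) with
      | true =>
        have hx : x = h - 1 := (beq_iff_eq.mp hhx).symm
        subst hx
        simp
      | false =>
        have hne : (x == h - 1) = false := by
          rw [beq_eq_false_iff_ne]
          intro he
          simp [he] at hhx
        rw [hne]
        simp

lemma pyRange_shift' (u v : Int) :
    (PySem.List.pyRange u v).map (fun x => x - 1) = PySem.List.pyRange (u - 1) (v - 1) := by
  rw [pyRange_shift u (v - 1)]
  simp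

lemma gaps_spec (cov : List (Int × Int)) (hinv : covInv cov) :
    ∀ (cur : Int) (hi : Int) (res : List Int), cur ≤ hi + 1 →
    pvGapsGo hi cur res cov
      = res ++ ((PySem.List.pyRange cur (hi + 1)).filter (fun ob => !covMem ob cov)).map (fun ob => ob - 1) := by
  induction cov with
  | nil =>
    intro cur hi res _
    rw [pvGapsGo, List.filter_eq_self.mpr (by intro x _; simp [covMem])]
    rw [pyRange_shift]
  | cons hd rest ih =>
    obtain ⟨a, b⟩ := hd
    obtain ⟨hpw, hab⟩ := hinv
    have hpw' := (List.pairwise_cons.mp hpw).2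
    have hsep := (List.pairwise_cons.mp hpw).1
    have hinv' : covInv rest := ⟨hpw', fun p hp => hab p (by simp [hp])⟩
    have hab1 : a ≤ b := hab (a, b) (by simp)
    intro cur hi res hcur
    rw [pvGapsGo]
    by_cases hbc : b < cur
    · rw [if_pos hbc, ih hinv' cur hi res hcur]
      congr 2
      apply List.filter_congr
      intro x hx
      have hx1 := (PySem.List.mem_pyRange_one.mp hx).1
      simp only [covMem, List.any_cons]
      have hxb : decide (x ≤ b) = false := decide_eq_false (by omega)
      simp [hxb]
    · rw [if_neg hbc]
      by_cases hahi : a > hi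
      · rw [if_pos hahi]
        rw [List.filter_eq_self.mpr ?_, pyRange_shift]
        intro x hx
        have hx2 := (PySem.List.mem_pyRange_one.mp hx).2
        simp only [covMem, List.any_cons, Bool.not_eq_eq_eq_not, Bool.not_true]
        have h1 : decide (a ≤ x) = false := decide_eq_false (by omega)
        have h2 : rest.any (fun p => decide (p.1 ≤ x) && decide (x ≤ p.2)) = false := by
          rw [List.any_eq_false]
          intro p hp
          have := hsep p hp
          simp only [Bool.and_eq_true, decide_eq_true_eq, not_and]
          intro hle
          omega
        simp [h1, h2]
      · rw [if_neg hahi]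
        simp only []
        by_cases hb1 : b + 1 > hi
        · rw [if_pos hb1]
          -- everything ≥ a in [cur, hi] is covered by (a,b); rest never fires
          have hsplit := PySem.List.pyRange_one_append cur (max cur (min a (hi + 1))) (hi + 1)
            (by omega) (by omega)
          rw [hsplit, List.filter_append, List.map_append]
          have hkeep : (PySem.List.pyRange cur (max cur (min a (hi + 1)))).filter
              (fun ob => !covMem ob ((a, b) :: rest))
              = PySem.List.pyRange cur (max cur (min a (hi + 1))) := by
            apply List.filter_eq_self.mpr
            intro x hx
            obtain ⟨hx1, hx2⟩ := PySem.List.mem_pyRange_one.mp hx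
            simp only [covMem, List.any_cons, Bool.not_eq_eq_eq_not, Bool.not_true]
            have h1 : decide (a ≤ x) = false := decide_eq_false (by omega)
            have h2 : rest.any (fun p => decide (p.1 ≤ x) && decide (x ≤ p.2)) = false := by
              rw [List.any_eq_false]
              intro p hp
              have := hsep p hp
              simp only [Bool.and_eq_true, decide_eq_true_eq, not_and]
              intro hle
              omega
            simp [h1, h2]
          have hdrop : (PySem.List.pyRange (max cur (min a (hi + 1))) (hi + 1)).filter
              (fun ob => !covMem ob ((a, b) :: rest)) = [] := by
            apply List.filter_eq_nil_iff.mpr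
            intro x hx
            obtain ⟨hx1, hx2⟩ := PySem.List.mem_pyRange_one.mp hx
            simp only [covMem, List.any_cons, Bool.not_eq_eq_eq_not, Bool.not_true]
            have h1 : decide (a ≤ x) = true := decide_eq_true (by omega)
            have h2 : decide (x ≤ b) = true := decide_eq_true (by omega)
            simp [h1, h2]
          rw [hkeep, hdrop]
          simp only [List.map_nil, List.append_nil]
          rw [pyRange_shift']
          by_cases hca : cur < a
          · have e1 : min (a - 1) hi = a - 1 := by omega
            have e2 : max cur (min a (hi + 1)) - 1 = a - 1 := by omega
            rw [e1, e2]
          · have e1 : max cur (min a (hi + 1)) = cur := by omega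
            rw [e1]
            rw [pyRange_nil (by omega), pyRange_nil (by omega : cur - 1 ≤ cur - 1)]
        · rw [if_neg hb1]
          rw [ih hinv' (b + 1) hi (res ++ PySem.List.pyRange (cur - 1) (min (a - 1) hi)) (by omega)]
          have hsplit := PySem.List.pyRange_one_append cur (b + 1) (hi + 1) (by omega) (by omega)
          rw [hsplit, List.filter_append, List.map_append]
          -- second chunk: head interval never fires
          have hch2 : (PySem.List.pyRange (b + 1) (hi + 1)).filter
              (fun ob => !covMem ob ((a, b) :: rest))
              = (PySem.List.pyRange (b + 1) (hi + 1)).filter (fun ob => !covMem ob rest) := by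
            apply List.filter_congr
            intro x hx
            have hx1 := (PySem.List.mem_pyRange_one.mp hx).1
            simp only [covMem, List.any_cons]
            have hxb : decide (x ≤ b) = false := decide_eq_false (by omega)
            simp [hxb]
          -- first chunk: keep exactly [cur, a)
          have hsplit1 := PySem.List.pyRange_one_append cur (max cur a) (b + 1)
            (by omega) (by omega)
          have hkeep : (PySem.List.pyRange cur (max cur a)).filter
              (fun ob => !covMem ob ((a, b) :: rest))
              = PySem.List.pyRange cur (max cur a) := by
            apply List.filter_eq_self.mpr
            intro x hx
            obtain ⟨hx1, hx2⟩ := PySem.List.mem_pyRange_one.mp hx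
            simp only [covMem, List.any_cons, Bool.not_eq_eq_eq_not, Bool.not_true]
            have h1 : decide (a ≤ x) = false := decide_eq_false (by omega)
            have h2 : rest.any (fun p => decide (p.1 ≤ x) && decide (x ≤ p.2)) = false := by
              rw [List.any_eq_false]
              intro p hp
              have := hsep p hp
              simp only [Bool.and_eq_true, decide_eq_true_eq, not_and]
              intro hle
              omega
            simp [h1, h2]
          have hdrop : (PySem.List.pyRange (max cur a) (b + 1)).filter
              (fun ob => !covMem ob ((a, b) :: rest)) = [] := by
            apply List.filter_eq_nil_iff.mpr
            intro x hx
            obtain ⟨hx1, hx2⟩ := PySem.List.mem_pyRange_one.mp hx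
            simp only [covMem, List.any_cons, Bool.not_eq_eq_eq_not, Bool.not_true]
            have h1 : decide (a ≤ x) = true := decide_eq_true (by omega)
            have h2 : decide (x ≤ b) = true := decide_eq_true (by omega)
            simp [h1, h2]
          rw [hsplit1, List.filter_append, hkeep, hdrop, List.append_nil, hch2]
          rw [pyRange_shift']
          have emit : PySem.List.pyRange (cur - 1) (min (a - 1) hi)
              = PySem.List.pyRange (cur - 1) (max cur a - 1) := by
            by_cases hca : cur < a
            · have e1 : min (a - 1) hi = a - 1 := by omega
              have e2 : max cur a - 1 = a - 1 := by omega
              rw [e1, e2]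
            · have e1 : max cur a = cur := by omega
              rw [e1]
              rw [pyRange_nil (by omega), pyRange_nil (by omega : cur - 1 ≤ cur - 1)]
          rw [emit, List.append_assoc]



-- once every remaining interval starts beyond hi+1, merge just inserts
lemma merge_post (cov : List (Int × Int)) :
    ∀ (lo hi : Int) (pre post : List (Int × Int)), lo ≤ hi →
    (∀ p ∈ cov, hi + 1 < p.1) → (∀ p ∈ cov, p.1 ≤ p.2) →
    pvMergeGo lo hi pre post cov = pre ++ [(lo, hi)] ++ post ++ cov := by
  induction cov with
  | nil => intro lo hi pre post _ _ _; simp [pvMergeGo]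
  | cons hd rest ih =>
    intro lo hi pre post hlohi hgt hab
    obtain ⟨a, b⟩ := hd
    have h1 : hi + 1 < a := hgt (a, b) (by simp)
    have h2 : a ≤ b := hab (a, b) (by simp)
    rw [pvMergeGo]
    rw [if_neg (by omega), if_pos (by omega)]
    rw [ih lo hi pre (post ++ [(a, b)]) hlohi (fun p hp => hgt p (by simp [hp]))
        (fun p hp => hab p (by simp [hp]))]
    simp

lemma merge_mem (cov : List (Int × Int)) (hinv : covInv cov) :
    ∀ (lo hi : Int) (pre : List (Int × Int)), lo ≤ hi → ∀ (x : Int),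
    covMem x (pvMergeGo lo hi pre [] cov)
      = (covMem x pre || covMem x cov || (decide (lo ≤ x) && decide (x ≤ hi))) := by
  induction cov with
  | nil =>
    intro lo hi pre _ x
    simp [pvMergeGo, covMem, List.any_append]
  | cons hd rest ih =>
    obtain ⟨a, b⟩ := hd
    obtain ⟨hpw, hab⟩ := hinv
    have hpw' := (List.pairwise_cons.mp hpw).2
    have hsep := (List.pairwise_cons.mp hpw).1
    have hinv' : covInv rest := ⟨hpw', fun p hp => hab p (by simp [hp])⟩
    have hab1 : a ≤ b := hab (a, b) (by simp)
    intro lo hi pre hlohi x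
    rw [pvMergeGo]
    by_cases hc1 : b < lo - 1
    · rw [if_pos hc1, ih hinv' lo hi (pre ++ [(a, b)]) hlohi x]
      simp only [covMem, List.any_append, List.any_cons, List.any_nil]
      cases hp : pre.any (fun p => decide (p.1 ≤ x) && decide (x ≤ p.2)) <;>
        cases hq : (decide (a ≤ x) && decide (x ≤ b)) <;> simp
    · rw [if_neg hc1]
      by_cases hc2 : a > hi + 1
      · rw [if_pos hc2]
        rw [merge_post rest lo hi pre ([] ++ [(a, b)]) hlohi
            (fun p hp => by have := hsep p hp; omega)
            (fun p hp => hab p (by simp [hp]))]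
        simp only [covMem, List.any_append, List.any_cons, List.any_nil]
        cases hp : pre.any (fun p => decide (p.1 ≤ x) && decide (x ≤ p.2)) <;>
          cases hq : (decide (a ≤ x) && decide (x ≤ b)) <;> simp [Bool.or_comm]
      · rw [if_neg hc2]
        rw [ih hinv' (min lo a) (max hi b) pre (by omega) x]
        simp only [covMem, List.any_cons]
        have key : (decide (min lo a ≤ x) && decide (x ≤ max hi b))
            = ((decide (a ≤ x) && decide (x ≤ b)) || (decide (lo ≤ x) && decide (x ≤ hi))) := by
          rw [Bool.eq_iff_iff]
          simp only [Bool.and_eq_true, Bool.or_eq_true, decide_eq_true_eq]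
          omega
        rw [key]
        cases pre.any (fun p => decide (p.1 ≤ x) && decide (x ≤ p.2)) <;>
          cases (decide (a ≤ x) && decide (x ≤ b)) <;>
          cases rest.any (fun p => decide (p.1 ≤ x) && decide (x ≤ p.2)) <;>
          cases (decide (lo ≤ x) && decide (x ≤ hi)) <;> simp

lemma merge_inv (cov : List (Int × Int)) (hinv : covInv cov) :
    ∀ (lo hi : Int) (pre : List (Int × Int)), lo ≤ hi →
    covInv pre → (∀ p ∈ pre, p.2 + 1 < lo) → (∀ p ∈ pre, ∀ q ∈ cov, p.2 + 1 < q.1) →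
    covInv (pvMergeGo lo hi pre [] cov) := by
  induction cov with
  | nil =>
    intro lo hi pre hlohi hpre hprelo _
    rw [pvMergeGo]
    simp only [List.append_nil]
    refine ⟨List.pairwise_append.mpr ⟨hpre.1, List.pairwise_singleton _ _, ?_⟩, ?_⟩
    · intro p hp q hq
      simp at hq
      subst hq
      exact hprelo p hp
    · intro p hp
      rcases List.mem_append.mp hp with h | h
      · exact hpre.2 p h
      · simp at h; subst h; exact hlohi
  | cons hd rest ih =>
    obtain ⟨a, b⟩ := hd
    obtain ⟨hpw, hab⟩ := hinv
    have hpw' := (List.pairwise_cons.mp hpw).2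
    have hsep := (List.pairwise_cons.mp hpw).1
    have hinv' : covInv rest := ⟨hpw', fun p hp => hab p (by simp [hp])⟩
    have hab1 : a ≤ b := hab (a, b) (by simp)
    intro lo hi pre hlohi hpre hprelo hprecov
    rw [pvMergeGo]
    by_cases hc1 : b < lo - 1
    · rw [if_pos hc1]
      apply ih hinv' lo hi (pre ++ [(a, b)]) hlohi
      · constructor
        · rw [List.pairwise_append]
          exact ⟨hpre.1, List.pairwise_singleton _ _,
            fun p hp q hq => by simp at hq; subst hq; exact hprecov p hp (a, b) (by simp)⟩
        · intro p hp
          rcases List.mem_append.mp hp with h | h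
          · exact hpre.2 p h
          · simp at h; subst h; exact hab1
      · intro p hp
        rcases List.mem_append.mp hp with h | h
        · exact hprelo p h
        · simp at h; subst h; simp; omega
      · intro p hp q hq
        rcases List.mem_append.mp hp with h | h
        · exact hprecov p h q (by simp [hq])
        · simp at h; subst h; exact hsep q hq
    · rw [if_neg hc1]
      by_cases hc2 : a > hi + 1
      · rw [if_pos hc2]
        rw [merge_post rest lo hi pre ([] ++ [(a, b)]) hlohi
            (fun p hp => by have := hsep p hp; omega)
            (fun p hp => hab p (by simp [hp]))]
        have heq : pre ++ [(lo, hi)] ++ ([] ++ [(a, b)]) ++ rest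
            = pre ++ ((lo, hi) :: (a, b) :: rest) := by simp
        rw [heq]
        constructor
        · rw [List.pairwise_append]
          refine ⟨hpre.1, ?_, ?_⟩
          · refine List.pairwise_cons.mpr ⟨?_, List.pairwise_cons.mpr ⟨hsep, hpw'⟩⟩
            intro q hq
            rcases List.mem_cons.mp hq with h | h
            · subst h; simp; omega
            · have := hsep q h; simp at this ⊢; omega
          · intro p hp q hq
            rcases List.mem_cons.mp hq with h | h
            · subst h; simp; exact hprelo p hp
            · exact hprecov p hp q h
        · intro p hp
          rcases List.mem_append.mp hp with h | h
          · exact hpre.2 p h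
          · rcases List.mem_cons.mp h with h2 | h2
            · subst h2; exact hlohi
            · exact hab p h2
      · rw [if_neg hc2]
        apply ih hinv' (min lo a) (max hi b) pre (by omega) hpre
        · intro p hp
          have h1 := hprelo p hp
          have h2 := hprecov p hp (a, b) (by simp)
          simp at h2 ⊢
          omega
        · intro p hp q hq
          exact hprecov p hp q (by simp [hq])

lemma main_fold (length : Int) (ranges : List (Option Int × Option Int)) :
    ∀ (out : List Int) (seen : PySem.Set Int) (cov : List (Int × Int)),
    covInv cov → (∀ x, seen.contains x = covMem (x + 1) cov) →
    (ranges.foldl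
      (fun (st : List Int × PySem.Set Int) r =>
        let first : Int := match r.1 with | none => 1 | some s => s
        let last : Int := match r.2 with | none => length | some e => e
        (PySem.List.pyRange first (min last length + 1)).foldl
          (fun st one_based =>
            let zero_based := one_based - 1
            if PySem.Set.contains st.2 zero_based then st
            else (st.1 ++ [zero_based], PySem.Set.add st.2 zero_based))
          st)
      (out, seen)).1
    = (ranges.foldl
      (fun (st : List Int × List (Int × Int)) r =>
        let lo : Int := match r.1 with | none => 1 | some s => s
        let hi : Int := min (match r.2 with | none => length | some e => e) length
        if lo > hi then st
        else (st.1 ++ pvGapsGo hi lo [] st.2, pvMergeGo lo hi [] [] st.2))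
      (out, cov)).1 := by
  induction ranges with
  | nil => intro out seen cov _ _; rfl
  | cons r rs ih =>
    obtain ⟨s0, e0⟩ := r
    intro out seen cov hinv hrel
    simp only [List.foldl_cons]
    set lo : Int := (match s0 with | none => 1 | some s => s) with hlo
    set hi : Int := min (match e0 with | none => length | some e => e) length with hhi
    by_cases hlh : lo > hi
    · rw [if_pos hlh, pyRange_nil (by omega), List.foldl_nil]
      exact ih out seen cov hinv hrel
    · rw [if_neg hlh]
      have hcur : lo ≤ hi + 1 := by omega
      have hnd := PySem.List.nodup_pyRange_one lo (hi + 1)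
      have hfc : (PySem.List.pyRange lo (hi + 1)).filter (fun ob => !seen.contains (ob - 1))
          = (PySem.List.pyRange lo (hi + 1)).filter (fun ob => !covMem ob cov) := by
        apply List.filter_congr
        intro x _
        rw [hrel (x - 1)]
        norm_num
      have hinv2 : covInv (pvMergeGo lo hi [] [] cov) :=
        merge_inv cov hinv lo hi [] (by omega) ⟨List.Pairwise.nil, by simp⟩ (by simp) (by simp)
      have hrel2 : ∀ x,
          (((PySem.List.pyRange lo (hi + 1)).foldl
            (fun st one_based =>
              let zero_based := one_based - 1
              if PySem.Set.contains st.2 zero_based then st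
              else (st.1 ++ [zero_based], PySem.Set.add st.2 zero_based)) (out, seen)).2).contains x
          = covMem (x + 1) (pvMergeGo lo hi [] [] cov) := by
        intro x
        rw [innerA_snd _ out seen x, merge_mem cov hinv lo hi [] (by omega) (x + 1), hrel x]
        have hany : (PySem.List.pyRange lo (hi + 1)).any (fun ob => ob - 1 == x)
            = (decide (lo ≤ x + 1) && decide (x + 1 ≤ hi)) := by
          rw [Bool.eq_iff_iff]
          simp only [List.any_eq_true, PySem.List.mem_pyRange_one, beq_iff_eq,
            Bool.and_eq_true, decide_eq_true_eq]
          constructor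
          · rintro ⟨ob, ⟨h1, h2⟩, h3⟩; omega
          · rintro ⟨h1, h2⟩; exact ⟨x + 1, ⟨by omega, by omega⟩, by omega⟩
        rw [hany]
        simp [covMem]
      have hmain := ih
        (((PySem.List.pyRange lo (hi + 1)).foldl
            (fun st one_based =>
              let zero_based := one_based - 1
              if PySem.Set.contains st.2 zero_based then st
              else (st.1 ++ [zero_based], PySem.Set.add st.2 zero_based)) (out, seen)).1)
        (((PySem.List.pyRange lo (hi + 1)).foldl
            (fun st one_based =>
              let zero_based := one_based - 1
              if PySem.Set.contains st.2 zero_based then st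
              else (st.1 ++ [zero_based], PySem.Set.add st.2 zero_based)) (out, seen)).2)
        (pvMergeGo lo hi [] [] cov) hinv2 hrel2
      rw [Prod.mk.eta] at hmain
      rw [hmain]
      congr 2
      rw [innerA_fst _ hnd out seen, hfc, gaps_spec cov hinv lo hi [] hcur]
      simp

-- ===== VERDICT (by name: the statement is the Claim_ definition above) =====
theorem selected_indexes_spec : Claim_equal_selected_indexes := by
  intro length ranges _
  unfold Spec_selected_indexes selected_indexes selected_indexes_alt
  exact main_fold length ranges [] PySem.Set.empty [] ⟨List.Pairwise.nil, by simp⟩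
    (fun x => by simp [PySem.Set.empty, PySem.Set.contains, covMem])
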